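-- pv_equiv track=rewrite | github.com/eucalyptus/eucaconsole | eucaconsole/views/cloudwatchapi.py | modify_granularity
-- ===== SOURCE A (Python) =====
-- def modify_granularity(duration):
--     """
--     Modify granularity based on duration to avoid exceeding 1440 data points
--
--     :type duration: integer
--     :param duration:  Length, in seconds, spanning the returned datapoints.
--
--     :rtype: integer
--     :returns: adusted granularity (period)
--
--     """
--     hour = 3600
--     ranges = [  # min/max values are in hours
--         dict(min=0, max=6, period=300),  # Set granularity to 5 minutes if duration < 6 hours
--         dict(min=6, max=12, period=600),
--         dict(min=12, max=24, period=1200),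
--         dict(min=24, max=3 * 24, period=1 * hour),
--         dict(min=3 * 24, max=7 * 24, period=3 * hour),
--         dict(min=7 * 24, max=30 * 24, period=6 * hour),
--     ]
--     for item in ranges:
--         if (item.get('min') * hour) <= duration < (item.get('max') * hour):
--             return item.get('period')
--     return 300  # Default to 5 minutes
-- ===== SOURCE B (Python) =====
-- def modify_granularity(duration):
--     thresholds = [21600, 43200, 86400, 259200, 604800, 2592000]
--     periods = [300, 600, 1200, 3600, 10800, 21600]
--     lo, hi = 0, len(thresholds)
--     while lo < hi:  # bisect_right by hand
--         mid = (lo + hi) // 2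
--         if duration < thresholds[mid]:
--             hi = mid
--         else:
--             lo = mid + 1
--     return periods[lo] if lo < len(periods) else 300
-- ===== Notes on version B (the rewrite author's own statement) =====
-- stated objective: alternative
-- what changed: Replaced the linear scan over min/max dicts with a binary search (bisect_right by hand) over a sorted list of upper second-boundaries, indexing into a parallel period list with the default period when out of range.
import Mathlib
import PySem

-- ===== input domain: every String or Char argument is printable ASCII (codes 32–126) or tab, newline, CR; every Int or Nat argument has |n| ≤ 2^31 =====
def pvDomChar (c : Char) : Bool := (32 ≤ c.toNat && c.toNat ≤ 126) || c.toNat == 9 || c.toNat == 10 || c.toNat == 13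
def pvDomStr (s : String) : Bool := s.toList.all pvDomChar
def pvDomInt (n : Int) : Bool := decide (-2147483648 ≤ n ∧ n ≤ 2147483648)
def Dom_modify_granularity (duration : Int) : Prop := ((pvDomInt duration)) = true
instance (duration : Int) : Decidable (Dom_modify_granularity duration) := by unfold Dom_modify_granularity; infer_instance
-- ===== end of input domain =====

-- B replaces A's linear scan over min/max range dicts with a hand-written binary search
-- over the sorted upper boundaries (alternative decomposition, same result).

-- ===== PORT A =====
-- each dict(min=…, max=…, period=…) is represented as the triple (min, max, period)
def pvScanA (duration : Int) : List (Int × Int × Int) → Int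
  | [] => 300
  | (mn, mx, p) :: rest =>
      if mn * 3600 ≤ duration ∧ duration < mx * 3600 then p else pvScanA duration rest

def modify_granularity (duration : Int) : Int :=
  pvScanA duration
    [(0, 6, 300), (6, 12, 600), (12, 24, 1200), (24, 3 * 24, 3600),
     (3 * 24, 7 * 24, 3 * 3600), (7 * 24, 30 * 24, 6 * 3600)]

-- ===== PORT B =====
-- the while loop on (lo, hi); fuel = hi - lo at entry bounds the iterations (totalization guard only)
def pvBisect (duration : Int) (xs : List Int) : Nat → Nat → Nat → Nat
  | 0, lo, _ => lo
  | fuel + 1, lo, hi =>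
    if lo < hi then
      let mid := (lo + hi) / 2
      if duration < (PySem.List.pyGet? xs (Int.ofNat mid)).getD 0 then
        pvBisect duration xs fuel lo mid
      else
        pvBisect duration xs fuel (mid + 1) hi
    else lo

def modify_granularity_alt (duration : Int) : Int :=
  let thresholds : List Int := [21600, 43200, 86400, 259200, 604800, 2592000]
  let periods : List Int := [300, 600, 1200, 3600, 10800, 21600]
  let lo := pvBisect duration thresholds thresholds.length 0 thresholds.length
  if lo < periods.length then (PySem.List.pyGet? periods (Int.ofNat lo)).getD 0 else 300

-- ===== PRECONDITION & SPEC =====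
def Spec_modify_granularity (duration : Int) (out : Int) : Prop := out = modify_granularity_alt duration
instance (duration : Int) (out : Int) : Decidable (Spec_modify_granularity duration out) := by unfold Spec_modify_granularity; infer_instance

-- ===== CLAIM (what is proved, stated in full; the proofs are below) =====
def Claim_equal_modify_granularity : Prop := ∀ (duration : Int), Dom_modify_granularity duration → Spec_modify_granularity duration (modify_granularity duration)

-- ===== LEMMAS AND PROOFS =====
-- stepwise evaluation of pvBisect on the concrete thresholds list

theorem pvB_eq (d : Int) (xs : List Int) (f k : Nat) : pvBisect d xs f k k = k := by
  cases f <;> simp [pvBisect]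

theorem pvB01 (d : Int) (f : Nat) :
    pvBisect d [21600, 43200, 86400, 259200, 604800, 2592000] (f + 1) 0 1 =
      if d < 21600 then 0 else 1 := by
  rw [pvBisect]
  norm_num [pvB_eq, PySem.List.pyGet?, PySem.List.pyIdx?, Int.toNat]

theorem pvB23 (d : Int) (f : Nat) :
    pvBisect d [21600, 43200, 86400, 259200, 604800, 2592000] (f + 1) 2 3 =
      if d < 86400 then 2 else 3 := by
  rw [pvBisect]
  norm_num [pvB_eq, PySem.List.pyGet?, PySem.List.pyIdx?, Int.toNat]

theorem pvB45 (d : Int) (f : Nat) :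
    pvBisect d [21600, 43200, 86400, 259200, 604800, 2592000] (f + 1) 4 5 =
      if d < 604800 then 4 else 5 := by
  rw [pvBisect]
  norm_num [pvB_eq, PySem.List.pyGet?, PySem.List.pyIdx?, Int.toNat]

theorem pvB03 (d : Int) (f : Nat) :
    pvBisect d [21600, 43200, 86400, 259200, 604800, 2592000] (f + 2) 0 3 =
      if d < 43200 then (if d < 21600 then 0 else 1) else (if d < 86400 then 2 else 3) := by
  rw [pvBisect]
  norm_num [pvB01, pvB23, PySem.List.pyGet?, PySem.List.pyIdx?, Int.toNat]

theorem pvB46 (d : Int) (f : Nat) :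
    pvBisect d [21600, 43200, 86400, 259200, 604800, 2592000] (f + 2) 4 6 =
      if d < 2592000 then (if d < 604800 then 4 else 5) else 6 := by
  rw [pvBisect]
  norm_num [pvB45, pvB_eq, PySem.List.pyGet?, PySem.List.pyIdx?, Int.toNat]

theorem pvB06 (d : Int) (f : Nat) :
    pvBisect d [21600, 43200, 86400, 259200, 604800, 2592000] (f + 3) 0 6 =
      if d < 259200 then
        (if d < 43200 then (if d < 21600 then 0 else 1) else (if d < 86400 then 2 else 3))
      else (if d < 2592000 then (if d < 604800 then 4 else 5) else 6) := by
  rw [pvBisect]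
  norm_num [pvB03, pvB46, PySem.List.pyGet?, PySem.List.pyIdx?, Int.toNat]

theorem pvAltEval (d : Int) :
    modify_granularity_alt d =
      if d < 21600 then 300 else if d < 43200 then 600 else if d < 86400 then 1200
      else if d < 259200 then 3600 else if d < 604800 then 10800
      else if d < 2592000 then 21600 else 300 := by
  unfold modify_granularity_alt
  norm_num [List.length]
  rw [show pvBisect d [21600, 43200, 86400, 259200, 604800, 2592000] 6 0 6 =
        pvBisect d [21600, 43200, 86400, 259200, 604800, 2592000] (3 + 3) 0 6 from rfl,
      pvB06 d]
  split_ifs <;> norm_num [PySem.List.pyGet?, PySem.List.pyIdx?, Int.toNat] <;> omega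

-- ===== VERDICT (by name: the statement is the Claim_ definition above) =====
theorem modify_granularity_spec : Claim_equal_modify_granularity := by
  intro d _
  unfold Spec_modify_granularity modify_granularity
  rw [pvAltEval d]
  simp only [pvScanA]
  split_ifs <;> omega
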